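-- pv_equiv track=rewrite | github.com/rbenda/ISA_multipoles | auxiliary_functions.py | number_final_expansion_centers
-- ===== SOURCE A (Python) =====
-- def number_final_expansion_centers(atomic_coordinates,boolean_all_atomic_sites,atomic_sites_to_omit,user_extra_final_sites,index_philosophy,nb_primitive_GTOs,correspondence_basis_pGTOs_atom_index):
--
--
--     #Case of the EXACT multipolar expansion, i.e. all overlap centers are kept as DMA final sites
--     if (index_philosophy==5):
--
--         number_final_DMA_sites=len(atomic_coordinates)
--
--         #We then count the 'P_{alpha,beta}' overlap centers not centered at nuclei
--         #i.e. originating from products of pGTOs NOT centered at the same point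
--         for alpha in range(nb_primitive_GTOs):
--
--             for beta in range(alpha+1,nb_primitive_GTOs):
--
--                 #In the case of two primitive GTOs centered on two different atoms (of different indexes)
--                 #==> the center of the product of the two gaussians is not a nuclei => we add it
--                 #in the list of overlap centers
--                 if (correspondence_basis_pGTOs_atom_index[alpha]!=correspondence_basis_pGTOs_atom_index[beta]):
--
--                     number_final_DMA_sites+=1
--
--         return number_final_DMA_sites
--
--     #Case of approximate multipolar expansion i.e. with redistribution of multipole moments
--     #to a reduced number of final sites
--     else :
--
--         ##'atomic_sites_to_omit' should be empty in the case of boolean_all_atomic_sites=True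
--         return len(atomic_coordinates)-len(atomic_sites_to_omit)+len(user_extra_final_sites)
-- ===== SOURCE B (Python) =====
-- def number_final_expansion_centers(atomic_coordinates, boolean_all_atomic_sites, atomic_sites_to_omit, user_extra_final_sites, index_philosophy, nb_primitive_GTOs, correspondence_basis_pGTOs_atom_index):
--     if index_philosophy == 5:
--         # Different-atom pairs = all pairs C(n,2) minus same-atom pairs sum C(count,2),
--         # computed from a single tally pass over the pGTO -> atom-index list.
--         n = max(nb_primitive_GTOs, 0)
--         counts = {}
--         for a in correspondence_basis_pGTOs_atom_index[:n]:
--             counts[a] = counts.get(a, 0) + 1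
--         same = sum(c * (c - 1) // 2 for c in counts.values())
--         return len(atomic_coordinates) + n * (n - 1) // 2 - same
--     return len(atomic_coordinates) - len(atomic_sites_to_omit) + len(user_extra_final_sites)
-- ===== Notes on version B (the rewrite author's own statement) =====
-- stated objective: alternative
-- what changed: Replaces the double loop over all pGTO pairs by one tally pass over the atom indices and the closed form C(n,2) minus the sum of C(count_i,2).
-- outside the precondition, e.g. on number_final_expansion_centers([1], False, [], [], 5, 3, [0, 1]): A raises IndexError, B returns 4
import Mathlib
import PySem

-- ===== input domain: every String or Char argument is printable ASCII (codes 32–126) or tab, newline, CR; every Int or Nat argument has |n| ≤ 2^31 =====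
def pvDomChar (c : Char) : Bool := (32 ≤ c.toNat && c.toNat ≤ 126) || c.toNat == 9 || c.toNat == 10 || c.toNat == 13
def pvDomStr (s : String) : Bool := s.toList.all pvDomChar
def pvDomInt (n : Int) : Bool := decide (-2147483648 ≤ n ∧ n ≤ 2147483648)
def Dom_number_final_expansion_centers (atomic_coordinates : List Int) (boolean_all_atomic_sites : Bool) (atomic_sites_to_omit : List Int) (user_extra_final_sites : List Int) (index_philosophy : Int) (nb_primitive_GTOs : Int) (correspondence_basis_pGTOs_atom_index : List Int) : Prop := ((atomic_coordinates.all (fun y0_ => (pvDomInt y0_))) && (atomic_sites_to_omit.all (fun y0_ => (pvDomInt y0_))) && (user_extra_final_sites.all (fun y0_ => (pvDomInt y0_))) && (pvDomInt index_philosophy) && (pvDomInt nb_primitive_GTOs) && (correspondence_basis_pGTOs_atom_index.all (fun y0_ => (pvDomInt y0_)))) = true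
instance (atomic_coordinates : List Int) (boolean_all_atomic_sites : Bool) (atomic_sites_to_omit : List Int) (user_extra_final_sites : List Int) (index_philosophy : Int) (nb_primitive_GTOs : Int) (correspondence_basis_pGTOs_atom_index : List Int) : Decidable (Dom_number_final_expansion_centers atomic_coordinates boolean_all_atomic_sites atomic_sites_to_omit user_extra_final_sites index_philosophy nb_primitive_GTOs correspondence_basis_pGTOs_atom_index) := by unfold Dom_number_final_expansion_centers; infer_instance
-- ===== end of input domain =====

-- B replaces A's double loop over pGTO pairs by one tally pass and the closed form C(n,2) - sum C(count_i,2) (objective: alternative).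


-- ===== PORT A =====
def number_final_expansion_centers (atomic_coordinates : List Int) (boolean_all_atomic_sites : Bool) (atomic_sites_to_omit : List Int) (user_extra_final_sites : List Int) (index_philosophy : Int) (nb_primitive_GTOs : Int) (correspondence_basis_pGTOs_atom_index : List Int) : Int :=
  if index_philosophy = 5 then
    (PySem.List.pyRange 0 nb_primitive_GTOs 1).foldl
      (fun acc alpha =>
        (PySem.List.pyRange (alpha + 1) nb_primitive_GTOs 1).foldl
          (fun acc2 beta =>
            if PySem.List.pyGetD correspondence_basis_pGTOs_atom_index alpha 0 ≠
               PySem.List.pyGetD correspondence_basis_pGTOs_atom_index beta 0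
            then acc2 + 1 else acc2)
          acc)
      ((atomic_coordinates.length : Int))
  else
    (atomic_coordinates.length : Int) - (atomic_sites_to_omit.length : Int) + (user_extra_final_sites.length : Int)

-- ===== PORT B =====
def number_final_expansion_centers_alt (atomic_coordinates : List Int) (boolean_all_atomic_sites : Bool) (atomic_sites_to_omit : List Int) (user_extra_final_sites : List Int) (index_philosophy : Int) (nb_primitive_GTOs : Int) (correspondence_basis_pGTOs_atom_index : List Int) : Int :=
  if index_philosophy = 5 then
    let n : Int := max nb_primitive_GTOs 0
    let pref := PySem.List.slice correspondence_basis_pGTOs_atom_index (some 0) (some n)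
    let counts : PySem.Dict Int Int :=
      pref.foldl (fun d a => d.insert a (d.getD a 0 + 1)) PySem.Dict.empty
    let same := (counts.values.map (fun c => PySem.Int.floordiv (c * (c - 1)) 2)).sum
    (atomic_coordinates.length : Int) + PySem.Int.floordiv (n * (n - 1)) 2 - same
  else
    (atomic_coordinates.length : Int) - (atomic_sites_to_omit.length : Int) + (user_extra_final_sites.length : Int)

-- ===== PRECONDITION & SPEC =====
-- Pre_ excludes only inputs on which A raises IndexError: index_philosophy = 5 with
-- nb_primitive_GTOs ≥ 2 exceeding the length of the correspondence list (A then indexes past its end).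
def Pre_number_final_expansion_centers (atomic_coordinates : List Int) (boolean_all_atomic_sites : Bool) (atomic_sites_to_omit : List Int) (user_extra_final_sites : List Int) (index_philosophy : Int) (nb_primitive_GTOs : Int) (correspondence_basis_pGTOs_atom_index : List Int) : Prop :=
  index_philosophy = 5 → (nb_primitive_GTOs ≤ (correspondence_basis_pGTOs_atom_index.length : Int) ∨ nb_primitive_GTOs ≤ 1)
instance (atomic_coordinates : List Int) (boolean_all_atomic_sites : Bool) (atomic_sites_to_omit : List Int) (user_extra_final_sites : List Int) (index_philosophy : Int) (nb_primitive_GTOs : Int) (correspondence_basis_pGTOs_atom_index : List Int) : Decidable (Pre_number_final_expansion_centers atomic_coordinates boolean_all_atomic_sites atomic_sites_to_omit user_extra_final_sites index_philosophy nb_primitive_GTOs correspondence_basis_pGTOs_atom_index) := by unfold Pre_number_final_expansion_centers; infer_instance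

def pvWitness_number_final_expansion_centers : List Int × Bool × List Int × List Int × Int × Int × List Int :=
  ([0], true, [], [], 5, 2, [0, 1])

def Spec_number_final_expansion_centers (atomic_coordinates : List Int) (boolean_all_atomic_sites : Bool) (atomic_sites_to_omit : List Int) (user_extra_final_sites : List Int) (index_philosophy : Int) (nb_primitive_GTOs : Int) (correspondence_basis_pGTOs_atom_index : List Int) (out : Int) : Prop := out = number_final_expansion_centers_alt atomic_coordinates boolean_all_atomic_sites atomic_sites_to_omit user_extra_final_sites index_philosophy nb_primitive_GTOs correspondence_basis_pGTOs_atom_index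
instance (atomic_coordinates : List Int) (boolean_all_atomic_sites : Bool) (atomic_sites_to_omit : List Int) (user_extra_final_sites : List Int) (index_philosophy : Int) (nb_primitive_GTOs : Int) (correspondence_basis_pGTOs_atom_index : List Int) (out : Int) : Decidable (Spec_number_final_expansion_centers atomic_coordinates boolean_all_atomic_sites atomic_sites_to_omit user_extra_final_sites index_philosophy nb_primitive_GTOs correspondence_basis_pGTOs_atom_index out) := by unfold Spec_number_final_expansion_centers; infer_instance

-- ===== CLAIM =====
def Claim_equal_number_final_expansion_centers : Prop := ∀ (atomic_coordinates : List Int) (boolean_all_atomic_sites : Bool) (atomic_sites_to_omit : List Int) (user_extra_final_sites : List Int) (index_philosophy : Int) (nb_primitive_GTOs : Int) (correspondence_basis_pGTOs_atom_index : List Int), Dom_number_final_expansion_centers atomic_coordinates boolean_all_atomic_sites atomic_sites_to_omit user_extra_final_sites index_philosophy nb_primitive_GTOs correspondence_basis_pGTOs_atom_index → Pre_number_final_expansion_centers atomic_coordinates boolean_all_atomic_sites atomic_sites_to_omit user_extra_final_sites index_philosophy nb_primitive_GTOs correspondence_basis_pGTOs_atom_index → Spec_number_final_expansion_centers atomic_coordinates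 boolean_all_atomic_sites atomic_sites_to_omit user_extra_final_sites index_philosophy nb_primitive_GTOs correspondence_basis_pGTOs_atom_index (number_final_expansion_centers atomic_coordinates boolean_all_atomic_sites atomic_sites_to_omit user_extra_final_sites index_philosophy nb_primitive_GTOs correspondence_basis_pGTOs_atom_index)

-- ===== LEMMAS AND PROOFS =====

def pvTri (c : Int) : Int := PySem.Int.floordiv (c * (c - 1)) 2
def pvSameP : List Int → Int
  | [] => 0
  | x :: t => (t.count x : Int) + pvSameP t
def pvDiffP : List Int → Int
  | [] => 0
  | x :: t => (t.countP (fun y => decide (¬ x = y)) : Int) + pvDiffP t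

lemma pvTri_succ (c : Int) : pvTri (c + 1) = pvTri c + c := by
  unfold pvTri
  rw [PySem.Int.floordiv_eq_ediv_of_pos (by norm_num), PySem.Int.floordiv_eq_ediv_of_pos (by norm_num)]
  obtain ⟨m, hm⟩ := Int.even_mul_succ_self (c - 1)
  obtain ⟨m', hm'⟩ := Int.even_mul_succ_self c
  have h1 : c * (c - 1) = 2 * m := by linear_combination hm
  have h2 : (c + 1) * ((c + 1) - 1) = 2 * m' := by linear_combination hm'
  rw [h1, h2]
  rw [Int.mul_ediv_cancel_left _ (by norm_num : (2:Int) ≠ 0), Int.mul_ediv_cancel_left _ (by norm_num : (2:Int) ≠ 0)]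
  have h3 : 2 * m' = 2 * m + 2 * c := by linear_combination hm - hm'
  omega

lemma pvTri_zero : pvTri 0 = 0 := by decide
lemma pvTri_one : pvTri 1 = 0 := by decide

lemma pvDiff_add_same (xs : List Int) : pvDiffP xs + pvSameP xs = pvTri (xs.length : Int) := by
  induction xs with
  | nil => simpa [pvDiffP, pvSameP] using pvTri_zero.symm
  | cons x t ih =>
    have hc : t.countP (fun y => decide (¬ x = y)) + t.count x = t.length := by
      have h := List.length_eq_countP_add_countP (l := t) (p := fun y => x == y)
      have h1 : t.countP (fun y => decide (¬ x = y)) = t.countP (fun a => decide (¬ (x == a) = true)) := by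
        apply List.countP_congr; intro y _; simp
      have h2 : t.count x = t.countP (fun y => x == y) := by
        rw [List.count]
        apply List.countP_congr; intro y _; rw [Bool.beq_comm]
      omega
    simp only [pvDiffP, pvSameP, List.length_cons, Nat.cast_add, Nat.cast_one, pvTri_succ]
    omega

lemma pvSum_diff (xs : List Int) :
    (((List.range xs.length).map
        (fun k => ((xs.drop (k + 1)).countP (fun y => decide (¬ xs.getD k 0 = y)) : Int))).sum)
      = pvDiffP xs := by
  induction xs with
  | nil => simp [pvDiffP]
  | cons x t ih =>
    rw [List.length_cons, List.range_succ_eq_map]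
    simp only [List.map_cons, List.map_map, List.sum_cons, Function.comp_def, Nat.succ_eq_add_one]
    have he : ((List.range t.length).map
        (fun k => (((x :: t).drop (k + 1 + 1)).countP (fun y => decide (¬ (x :: t).getD (k + 1) 0 = y)) : Int)))
        = (List.range t.length).map
        (fun k => ((t.drop (k + 1)).countP (fun y => decide (¬ t.getD k 0 = y)) : Int)) := by
      apply List.map_congr_left
      intro k _
      simp [List.getD]
    rw [he, ih]
    simp [pvDiffP, List.getD]

lemma pvSameP_append (t : List Int) (x : Int) :
    pvSameP (t ++ [x]) = (t.count x : Int) + pvSameP t := by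
  induction t with
  | nil => simp [pvSameP]
  | cons y t' ih =>
    simp only [List.cons_append, pvSameP, ih, List.count_cons, List.count_append]
    by_cases hxy : y = x
    · subst hxy; simp
    · simp [hxy, Ne.symm hxy]; omega

lemma pvSum_update (S : List Int) (f g : Int → Int) (x : Int) (hnd : S.Nodup) (hx : x ∈ S)
    (h : ∀ k ∈ S, k ≠ x → f k = g k) : (S.map f).sum = (S.map g).sum + (f x - g x) := by
  induction S with
  | nil => cases hx
  | cons y S' ih =>
    rcases List.mem_cons.mp hx with rfl | hx'
    · have hnot : x ∉ S' := (List.nodup_cons.mp hnd).1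
      have he : S'.map f = S'.map g := by
        apply List.map_congr_left
        intro k hk
        exact h k (List.mem_cons_of_mem _ hk) (by rintro rfl; exact hnot hk)
      simp [he]; ring
    · have hyx : y ≠ x := by rintro rfl; exact (List.nodup_cons.mp hnd).1 hx'
      have hih := ih (List.nodup_cons.mp hnd).2 hx' (fun k hk => h k (List.mem_cons_of_mem _ hk))
      simp [h y (List.mem_cons_self) hyx, hih]; ring

lemma pvSame_set (xs : List Int) :
    ((PySem.Set.ofList xs).map (fun k => pvTri ((xs.count k : Int)))).sum = pvSameP xs := by
  induction xs using List.reverseRecOn with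
  | nil => simp [pvSameP, PySem.Set.ofList]
  | append_singleton t x ih =>
    have hset : PySem.Set.ofList (t ++ [x]) = PySem.Set.add (PySem.Set.ofList t) x := by
      rw [PySem.Set.ofList_eq_foldl, PySem.Set.ofList_eq_foldl, List.foldl_append]
      rfl
    rw [hset, pvSameP_append]
    by_cases hmem : x ∈ t
    · have hadd : PySem.Set.add (PySem.Set.ofList t) x = PySem.Set.ofList t := by
        simp [PySem.Set.add, PySem.Set.contains, (PySem.Set.mem_ofList t x).mpr hmem]
      rw [hadd]
      have hupd := pvSum_update (PySem.Set.ofList t)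
          (fun k => pvTri (((t ++ [x]).count k : Int)))
          (fun k => pvTri ((t.count k : Int))) x
          (PySem.Set.nodup_ofList t) ((PySem.Set.mem_ofList t x).mpr hmem)
          (by
            intro k _ hkx
            have : (t ++ [x]).count k = t.count k := by
              simp [List.count_append, Ne.symm hkx]
            simp [this])
      rw [hupd, ih]
      have hx1 : ((t ++ [x]).count x : Int) = (t.count x : Int) + 1 := by
        simp [List.count_append]
      simp only
      rw [hx1, pvTri_succ]
      ring
    · have hadd : PySem.Set.add (PySem.Set.ofList t) x = PySem.Set.ofList t ++ [x] := by
        simp only [PySem.Set.add]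
        have : PySem.Set.contains (PySem.Set.ofList t) x = false := by
          simp [PySem.Set.contains]
          intro hc
          exact hmem hc
        rw [this]
        simp
      rw [hadd, List.map_append, List.sum_append]
      have hmapeq : (PySem.Set.ofList t).map (fun k => pvTri (((t ++ [x]).count k : Int)))
          = (PySem.Set.ofList t).map (fun k => pvTri ((t.count k : Int))) := by
        apply List.map_congr_left
        intro k hk
        have hkx : k ≠ x := by rintro rfl; exact hmem ((PySem.Set.mem_ofList t k).mp hk)
        have : (t ++ [x]).count k = t.count k := by
          simp [List.count_append, Ne.symm hkx]
        simp [this]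
      rw [hmapeq, ih]
      have hcx : t.count x = 0 := List.count_eq_zero.mpr hmem
      have : ((t ++ [x]).count x : Int) = 1 := by
        simp [List.count_append, hcx]
      simp [pvTri_one, hcx]

lemma pvA_loop (corr : List Int) (nb : Int) (init : Int)
    (h0 : 0 ≤ nb) (hle : nb ≤ (corr.length : Int)) :
    (PySem.List.pyRange 0 nb 1).foldl
      (fun acc alpha =>
        (PySem.List.pyRange (alpha + 1) nb 1).foldl
          (fun acc2 beta =>
            if PySem.List.pyGetD corr alpha 0 ≠ PySem.List.pyGetD corr beta 0
            then acc2 + 1 else acc2)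
          acc)
      init
    = init + pvDiffP (corr.take nb.toNat) := by
  set xs := corr.take nb.toNat with hxs
  have hlen : xs.length = nb.toNat := by
    simp [hxs]; omega
  have hlenI : (xs.length : Int) = nb := by rw [hlen]; omega
  have hgd : ∀ i : Int, 0 ≤ i → i < nb → PySem.List.pyGetD corr i 0 = PySem.List.pyGetD xs i 0 := by
    intro i h1 h2
    rw [PySem.List.pyGetD_eq_getElem corr 0 h1 (by omega),
        PySem.List.pyGetD_eq_getElem xs 0 h1 (by rw [hlenI]; omega)]
    show corr[i.toNat] = (List.take nb.toNat corr)[i.toNat]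
    simp [List.getElem_take]
  have houter : (PySem.List.pyRange 0 nb 1).foldl
      (fun acc alpha =>
        (PySem.List.pyRange (alpha + 1) nb 1).foldl
          (fun acc2 beta =>
            if PySem.List.pyGetD corr alpha 0 ≠ PySem.List.pyGetD corr beta 0
            then acc2 + 1 else acc2)
          acc)
      init
      = (PySem.List.pyRange 0 nb 1).foldl
      (fun acc alpha =>
        acc + ((xs.drop (alpha + 1).toNat).countP (fun y => decide (PySem.List.pyGetD xs alpha 0 ≠ y)) : Int))
      init := by
    apply PySem.List.foldl_congr_mem
    intro acc alpha hmem
    obtain ⟨ha0, halt⟩ := (PySem.List.mem_pyRange_one).mp hmem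
    have hinner : (PySem.List.pyRange (alpha + 1) nb 1).foldl
        (fun acc2 beta =>
          if PySem.List.pyGetD corr alpha 0 ≠ PySem.List.pyGetD corr beta 0
          then acc2 + 1 else acc2) acc
        = (PySem.List.pyRange (alpha + 1) (xs.length : Int) 1).foldl
        (fun acc2 beta =>
          if PySem.List.pyGetD xs alpha 0 ≠ PySem.List.pyGetD xs beta 0
          then acc2 + 1 else acc2) acc := by
      rw [hlenI]
      apply PySem.List.foldl_congr_mem
      intro acc2 beta hb
      obtain ⟨hb1, hb2⟩ := (PySem.List.mem_pyRange_one).mp hb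
      rw [hgd alpha ha0 halt, hgd beta (by omega) hb2]
    rw [hinner]
    rw [PySem.List.foldl_pyRange_pyGetD' xs 0
        (fun acc2 y => if PySem.List.pyGetD xs alpha 0 ≠ y then acc2 + 1 else acc2) acc (by omega)]
    rw [PySem.List.foldl_ite_add_one]
  rw [houter]
  rw [PySem.List.pyRange_one]
  rw [List.foldl_map]
  rw [PySem.List.foldl_add]
  congr 1
  have hn : (nb - 0).toNat = xs.length := by omega
  rw [hn]
  rw [← pvSum_diff xs]
  refine congrArg List.sum (List.map_congr_left ?_)
  intro k hk
  have hk' : k < xs.length := List.mem_range.mp hk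
  simp only [zero_add]
  have h2 : (((k : Int)) + 1).toNat = k + 1 := by omega
  rw [h2, PySem.List.pyGetD_natCast]


-- B's branch body, fully evaluated, in the in-range case
lemma pvB_main (ac corr : List Int) (nb : Int) (h0 : 0 ≤ nb) :
    (let n : Int := max nb 0
     let pref := PySem.List.slice corr (some 0) (some n)
     let counts : PySem.Dict Int Int :=
       pref.foldl (fun d a => d.insert a (d.getD a 0 + 1)) PySem.Dict.empty
     let same := (counts.values.map (fun c => PySem.Int.floordiv (c * (c - 1)) 2)).sum
     (ac.length : Int) + PySem.Int.floordiv (n * (n - 1)) 2 - same)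
    = (ac.length : Int) + pvTri nb - pvSameP (corr.take nb.toNat) := by
  have hmax : max nb 0 = nb := by omega
  simp only [hmax]
  have hpref : PySem.List.slice corr (some 0) (some nb) = corr.take nb.toNat := by
    rw [PySem.List.slice_zero_start, PySem.List.slice_to corr h0]
  rw [hpref, PySem.Dict.foldl_insert_getD_add_one_eq_counter]
  have hvals : (PySem.Dict.counter (corr.take nb.toNat)).values
      = (PySem.Set.ofList (corr.take nb.toNat)).map (fun k => (((corr.take nb.toNat).count k : Nat) : Int)) := by
    show (PySem.Dict.counter (corr.take nb.toNat)).items.map (·.2) = _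
    rw [PySem.Dict.items_counter, List.map_map]
    rfl
  rw [hvals, List.map_map]
  have hsame := pvSame_set (corr.take nb.toNat)
  have : ((PySem.Set.ofList (corr.take nb.toNat)).map
      ((fun c => PySem.Int.floordiv (c * (c - 1)) 2) ∘ fun k => (((corr.take nb.toNat).count k : Nat) : Int))).sum
      = pvSameP (corr.take nb.toNat) := by
    rw [← hsame]
    rfl
  rw [this]
  rfl

-- ===== VERDICT =====
theorem number_final_expansion_centers_spec : Claim_equal_number_final_expansion_centers := by
  intro ac ball omit_ extra phil nb corr _ hpre
  unfold Spec_number_final_expansion_centers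
  unfold number_final_expansion_centers number_final_expansion_centers_alt
  by_cases h5 : phil = 5
  · rw [if_pos h5, if_pos h5]
    by_cases hneg : nb ≤ 0
    · -- empty loop on both sides
      rw [PySem.List.pyRange_one_eq_nil hneg]
      have hmax : max nb 0 = 0 := by omega
      simp only [hmax, List.foldl_nil]
      have hpref : PySem.List.slice corr (some 0) (some 0) = ([] : List Int) := by
        rw [PySem.List.slice_zero_start, PySem.List.slice_to corr (le_refl 0)]
        rfl
      rw [hpref]
      simp [PySem.Dict.empty, PySem.Dict.values]
    · have h0 : 0 ≤ nb := by omega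
      by_cases hle : nb ≤ (corr.length : Int)
      · rw [pvA_loop corr nb _ h0 hle, pvB_main ac corr nb h0]
        have hlen : ((corr.take nb.toNat).length : Int) = nb := by simp; omega
        have hsplit := pvDiff_add_same (corr.take nb.toNat)
        rw [hlen] at hsplit
        omega
      · -- from Pre_: nb = 1 and corr = []
        have hnb1 : nb = 1 := by rcases hpre h5 with h | h <;> omega
        have hcorr : corr = [] := by
          have : corr.length = 0 := by omega
          exact List.length_eq_zero_iff.mp this
        subst hnb1; subst hcorr
        rw [PySem.List.pyRange_one_cons (by norm_num : (0:Int) < 1)]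
        rw [PySem.List.pyRange_one_eq_nil (by norm_num : (1:Int) ≤ 0 + 1)]
        simp [PySem.Dict.empty, PySem.Dict.values, PySem.List.slice_to]
  · rw [if_neg h5, if_neg h5]
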